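-- pv_equiv track=rewrite | github.com/fraka6/mlboost | mlboost/util/sequence.py | max_sequential_value
-- ===== SOURCE A (Python) =====
-- def max_sequential_value(sequence, value=True):
--     n = 0
--     max_n = 0
--
--     for el in sequence:
--         if el==value:
--             n+=1
--             max_n = max(max_n, n)
--         else:
--             n=0
--     return max_n
-- ===== SOURCE B (Python) =====
-- def max_sequential_value(sequence, value=True):
--     # Group the sequence into maximal runs of adjacent-equal elements,
--     # then return the max length among runs whose key equals value.
--     runs = []  # list of (key, length), most recent run last
--     for el in sequence:
--         if runs and runs[-1][0] == el:
--             runs[-1] = (el, runs[-1][1] + 1)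
--         else:
--             runs.append((el, 1))
--     return max((c for k, c in runs if k == value), default=0)
-- ===== Notes on version B (the rewrite author's own statement) =====
-- stated objective: alternative
-- what changed: B partitions the sequence into maximal runs of adjacent-equal elements in one pass and then reduces with max over the lengths of runs equal to value, replacing A's running-counter/reset loop with a group-then-reduce pass.
import Mathlib
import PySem

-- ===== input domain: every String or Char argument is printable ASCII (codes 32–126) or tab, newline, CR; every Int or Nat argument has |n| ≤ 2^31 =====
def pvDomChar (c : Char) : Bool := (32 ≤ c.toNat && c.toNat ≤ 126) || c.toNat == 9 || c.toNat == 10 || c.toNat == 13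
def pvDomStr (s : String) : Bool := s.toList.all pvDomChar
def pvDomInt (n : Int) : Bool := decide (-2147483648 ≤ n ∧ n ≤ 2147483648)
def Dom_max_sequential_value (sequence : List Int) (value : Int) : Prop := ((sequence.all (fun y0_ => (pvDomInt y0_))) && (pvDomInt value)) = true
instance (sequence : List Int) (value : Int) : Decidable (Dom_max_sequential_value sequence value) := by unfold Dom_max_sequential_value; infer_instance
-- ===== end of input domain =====

-- B replaces A's running-counter/reset loop by grouping the sequence into maximal
-- adjacent-equal runs and taking the max length among runs equal to value (alternative).


-- ===== PORT A =====
-- loop body of A: state (n, max_n)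
def pvStepA (value : Int) (s : Int × Int) (el : Int) : Int × Int :=
  if el == value then (s.1 + 1, max s.2 (s.1 + 1)) else (0, s.2)

def max_sequential_value (sequence : List Int) (value : Int) : Int :=
  (sequence.foldl (pvStepA value) (0, 0)).2

-- ===== PORT B =====
-- loop body of B: runs kept most-recent-first (Python appends at the end; the
-- final max over matching run lengths is order-independent)
def pvStepB (rs : List (Int × Int)) (el : Int) : List (Int × Int) :=
  match rs with
  | (k, c) :: rest => if k == el then (el, c + 1) :: rest else (el, 1) :: (k, c) :: rest
  | [] => [(el, 1)]

-- max((c for k, c in runs if k == value), default=0)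
def pvMaxMatch (value : Int) (rs : List (Int × Int)) : Int :=
  ((rs.filter (fun p => p.1 == value)).map Prod.snd).foldl max 0

def max_sequential_value_alt (sequence : List Int) (value : Int) : Int :=
  pvMaxMatch value (sequence.foldl pvStepB [])

-- ===== PRECONDITION & SPEC =====
def Spec_max_sequential_value (sequence : List Int) (value : Int) (out : Int) : Prop := out = max_sequential_value_alt sequence value
instance (sequence : List Int) (value : Int) (out : Int) : Decidable (Spec_max_sequential_value sequence value out) := by unfold Spec_max_sequential_value; infer_instance

-- ===== CLAIM (what is proved, stated in full; the proofs are below) =====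
def Claim_equal_max_sequential_value : Prop := ∀ (sequence : List Int) (value : Int), Dom_max_sequential_value sequence value → Spec_max_sequential_value sequence value (max_sequential_value sequence value)

-- ===== LEMMAS AND PROOFS =====

lemma foldl_max_max (l : List Int) : ∀ (a b : Int),
    l.foldl max (max a b) = max a (l.foldl max b) := by
  induction l with
  | nil => intro a b; simp
  | cons x xs ih =>
    intro a b
    simp only [List.foldl_cons]
    rw [max_assoc, ih]

lemma pvMaxMatch_cons (value k c : Int) (rs : List (Int × Int)) :
    pvMaxMatch value ((k, c) :: rs) =
      if k = value then max c (pvMaxMatch value rs) else pvMaxMatch value rs := by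
  unfold pvMaxMatch
  by_cases h : k = value
  · rw [if_pos h, List.filter_cons_of_pos (by simp [h]), List.map_cons, List.foldl_cons,
      max_comm (0 : Int) c, foldl_max_max]
  · rw [if_neg h, List.filter_cons_of_neg (by simp [h])]

-- the coupling invariant between A's (n, max_n) state and B's run list
lemma loop_eq (value : Int) (l : List Int) : ∀ (n m : Int) (rs : List (Int × Int)),
    (match rs with
     | [] => n = 0
     | (k, _) :: _ => if k = value then n = (rs.headI).2 else n = 0) →
    m = pvMaxMatch value rs →
    (l.foldl (pvStepA value) (n, m)).2 = pvMaxMatch value (l.foldl pvStepB rs) := by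
  induction l with
  | nil =>
    intro n m rs _ hm
    simpa using hm
  | cons el tl ih =>
    intro n m rs hn hm
    simp only [List.foldl_cons]
    match rs with
    | [] =>
      simp only at hn
      subst hn
      have hm0 : m = 0 := by simpa [pvMaxMatch] using hm
      subst hm0
      have hB : pvStepB [] el = [(el, 1)] := rfl
      rw [hB]
      by_cases hev : el = value
      · have hA : pvStepA value (0, 0) el = (1, 1) := by
          simp [pvStepA, hev]
        rw [hA]
        apply ih
        · simp [List.headI, hev]
        · simp [hev, pvMaxMatch]
      · have hA : pvStepA value (0, 0) el = (0, 0) := by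
          simp [pvStepA, hev]
        rw [hA]
        apply ih
        · simp [hev]
        · simp [hev, pvMaxMatch]
    | (k, c) :: rest =>
      simp only [List.headI] at hn
      by_cases hkel : k = el
      · -- the current run continues
        have hB : pvStepB ((k, c) :: rest) el = (el, c + 1) :: rest := by
          simp [pvStepB, hkel]
        rw [hB]
        by_cases hev : el = value
        · have hnc : n = c := by rw [if_pos (hkel.trans hev)] at hn; exact hn
          have hA : pvStepA value (n, m) el = (c + 1, max m (c + 1)) := by
            simp [pvStepA, hev, hnc]
          rw [hA]
          apply ih
          · simp [List.headI, hev]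
          · rw [pvMaxMatch_cons, if_pos hev, hm, pvMaxMatch_cons, if_pos (hkel.trans hev)]
            omega
        · have hA : pvStepA value (n, m) el = (0, m) := by
            simp [pvStepA, hev]
          rw [hA]
          apply ih
          · simp [hev]
          · rw [pvMaxMatch_cons, if_neg hev, hm, pvMaxMatch_cons,
              if_neg (by rw [hkel]; exact hev)]
      · -- a new run starts
        have hB : pvStepB ((k, c) :: rest) el = (el, 1) :: (k, c) :: rest := by
          simp [pvStepB, hkel]
        rw [hB]
        by_cases hev : el = value
        · have hn0 : n = 0 := by
            rw [if_neg (fun h => hkel (h.trans hev.symm))] at hn; exact hn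
          have hA : pvStepA value (n, m) el = (1, max m 1) := by
            simp [pvStepA, hev, hn0]
          rw [hA]
          apply ih
          · simp [List.headI, hev]
          · rw [pvMaxMatch_cons, if_pos hev, hm]
            omega
        · have hA : pvStepA value (n, m) el = (0, m) := by
            simp [pvStepA, hev]
          rw [hA]
          apply ih
          · simp [hev]
          · rw [pvMaxMatch_cons, if_neg hev]
            exact hm

-- ===== VERDICT (by name: the statement is the Claim_ definition above) =====
theorem max_sequential_value_spec : Claim_equal_max_sequential_value := by
  intro sequence value _
  unfold Spec_max_sequential_value max_sequential_value max_sequential_value_alt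
  exact loop_eq value sequence 0 0 [] (by simp) (by simp [pvMaxMatch])
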